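-- pv_equiv track=rewrite | github.com/Kohler98/marketplacefacebookbot | module/helpers.py | nueva_lista
-- ===== SOURCE A (Python) =====
-- def nueva_lista(lista = []):
--     nueva_lista = []
--     aux = 0
--     for i, elem in enumerate(lista):
--         if elem == 0:
--             if i > 0:
--                 nueva_lista.append(lista[i-1])
--         else:
--             aux = elem
--     nueva_lista.append(aux)
--     return nueva_lista
-- ===== SOURCE B (Python) =====
-- def nueva_lista(lista = []):
--     preds = [a for a, b in zip(lista, lista[1:]) if b == 0]
--     last = next((x for x in reversed(lista) if x != 0), 0)
--     return preds + [last]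
-- ===== Notes on version B (the rewrite author's own statement) =====
-- stated objective: alternative
-- what changed: Replaces A's single forward loop that threads an aux accumulator and does indexed lista[i-1] lookups by two independent pieces: a zip over adjacent pairs collecting predecessors of zeros, plus a reverse short-circuiting scan for the last nonzero element.
import Mathlib
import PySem

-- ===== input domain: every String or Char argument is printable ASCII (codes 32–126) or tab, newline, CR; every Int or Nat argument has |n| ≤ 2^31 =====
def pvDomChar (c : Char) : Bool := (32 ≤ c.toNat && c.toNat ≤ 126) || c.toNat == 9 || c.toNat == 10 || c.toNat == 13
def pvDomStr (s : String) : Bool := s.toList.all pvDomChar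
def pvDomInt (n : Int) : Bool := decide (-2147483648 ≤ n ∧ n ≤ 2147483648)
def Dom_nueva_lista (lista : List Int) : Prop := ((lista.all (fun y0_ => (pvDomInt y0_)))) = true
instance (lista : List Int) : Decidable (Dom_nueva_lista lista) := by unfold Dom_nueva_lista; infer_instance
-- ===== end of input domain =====

-- B replaces A's single accumulator-threading loop by a zip over adjacent pairs plus a
-- reverse scan for the last nonzero; same values, no speed claim.

-- ===== PORT A =====
-- one forward pass over enumerate(lista); lista[i-1] is ported with pyGet? (always in
-- range when the branch fires, since 0 < i < len; .getD 0 is never used)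
def nueva_lista (lista : List Int) : List Int :=
  let st := (PySem.List.enumerate lista 0).foldl
    (fun (s : List Int × Int) (p : Int × Int) =>
      if p.2 = 0 then
        (if p.1 > 0 then s.1 ++ [(PySem.List.pyGet? lista (p.1 - 1)).getD 0] else s.1, s.2)
      else (s.1, p.2)) ([], 0)
  st.1 ++ [st.2]

-- ===== PORT B =====
-- preds = [a for a, b in zip(lista, lista[1:]) if b == 0];
-- last = next((x for x in reversed(lista) if x != 0), 0); preds + [last]
def nueva_lista_alt (lista : List Int) : List Int :=
  let preds := ((lista.zip (PySem.List.slice lista (some 1) none)).filter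
      (fun p => p.2 == 0)).map (·.1)
  let last := match lista.reverse.find? (fun x => x != 0) with
    | some x => x
    | none => (0 : Int)
  preds ++ [last]

-- ===== PRECONDITION & SPEC =====
def Spec_nueva_lista (lista : List Int) (out : List Int) : Prop := out = nueva_lista_alt lista
instance (lista : List Int) (out : List Int) : Decidable (Spec_nueva_lista lista out) := by unfold Spec_nueva_lista; infer_instance

-- ===== CLAIM (what is proved, stated in full; the proofs are below) =====
def Claim_equal_nueva_lista : Prop := ∀ (lista : List Int), Dom_nueva_lista lista → Spec_nueva_lista lista (nueva_lista lista)

-- ===== LEMMAS AND PROOFS =====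

-- proof-only characterisations of A's fold state
def pvPredsOf : Option Int → List Int → List Int
  | _, [] => []
  | o, x :: xs =>
      (if x = 0 then (match o with | some p => [p] | none => []) else []) ++ pvPredsOf (some x) xs

def pvLastNZ : List Int → Int → Int
  | [], aux => aux
  | x :: xs, aux => pvLastNZ xs (if x = 0 then aux else x)

theorem pv_fold_char (L : List Int) :
    ∀ (l pre acc : List Int) (aux : Int), L = pre ++ l →
    (PySem.List.enumerate l (pre.length : Int)).foldl
      (fun (s : List Int × Int) (p : Int × Int) =>
        if p.2 = 0 then
          (if p.1 > 0 then s.1 ++ [(PySem.List.pyGet? L (p.1 - 1)).getD 0] else s.1, s.2)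
        else (s.1, p.2)) (acc, aux)
    = (acc ++ pvPredsOf pre.getLast? l, pvLastNZ l aux) := by
  intro l
  induction l with
  | nil => intro pre acc aux _; simp [PySem.List.enumerate, pvPredsOf, pvLastNZ]
  | cons x xs ih =>
    intro pre acc aux hL
    rw [PySem.List.enumerate_cons, List.foldl_cons]
    have hlen : ((pre.length : Int) + 1) = (((pre ++ [x]).length : Nat) : Int) := by
      simp
    by_cases hx : x = 0
    · subst hx
      by_cases hpre : pre = []
      · subst hpre
        simp only [List.length_nil, Int.natCast_zero, gt_iff_lt, lt_irrefl, if_true, if_false]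
        rw [show ((0:Int) + 1) = (([(0:Int)] : List Int).length : Int) by simp,
          ih [(0:Int)] acc aux (by simpa using hL)]
        simp [pvPredsOf, pvLastNZ]
      · have hpos : ((pre.length : Int)) > 0 := by
          have := List.length_pos_iff.mpr hpre; exact_mod_cast this
        simp only [if_pos hpos, if_true]
        have hget : (PySem.List.pyGet? L ((pre.length : Int) - 1)).getD 0 = pre.getLast hpre := by
          have h1 : ((pre.length : Int) - 1) = ((pre.length - 1 : Nat) : Int) := by
            have := List.length_pos_iff.mpr hpre; omega
          rw [h1, PySem.List.pyGet?_natCast, hL]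
          rw [List.getElem?_append_left (by have := List.length_pos_iff.mpr hpre; omega)]
          rw [List.getLast_eq_getElem]
          simp [List.getElem?_eq_getElem (by have := List.length_pos_iff.mpr hpre; omega : pre.length - 1 < pre.length)]
        rw [hget]
        rw [hlen, ih (pre ++ [(0:Int)]) (acc ++ [pre.getLast hpre]) aux (by simpa using hL)]
        have hgl : pre.getLast? = some (pre.getLast hpre) := List.getLast?_eq_some_getLast hpre
        simp [pvPredsOf, pvLastNZ, hgl, List.append_assoc]
    · simp only [if_neg hx]
      rw [hlen, ih (pre ++ [x]) acc x (by simpa using hL)]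
      simp [pvPredsOf, pvLastNZ, hx]

theorem pv_preds_zip : ∀ (xs : List Int) (a : Int),
    pvPredsOf (some a) xs
    = (((a :: xs).zip xs).filter (fun p => p.2 == 0)).map (·.1) := by
  intro xs
  induction xs with
  | nil => intro a; simp [pvPredsOf]
  | cons y ys ih =>
    intro a
    simp only [pvPredsOf, List.zip_cons_cons, List.filter_cons]
    by_cases hy : y = 0
    · subst hy; simp [ih 0]
    · simp [hy, ih y]

theorem pv_preds_none (lista : List Int) :
    pvPredsOf none lista
    = ((lista.zip (PySem.List.slice lista (some 1) none)).filter (fun p => p.2 == 0)).map (·.1) := by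
  rw [PySem.List.slice_from_one]
  cases lista with
  | nil => simp [pvPredsOf]
  | cons a xs => simp [pvPredsOf, pv_preds_zip xs a]

theorem pv_lastnz_find : ∀ (l : List Int) (aux : Int),
    pvLastNZ l aux
    = (match l.reverse.find? (fun x => x != 0) with | some x => x | none => aux) := by
  intro l
  induction l with
  | nil => intro aux; simp [pvLastNZ]
  | cons x xs ih =>
    intro aux
    rw [pvLastNZ, ih, List.reverse_cons, List.find?_append]
    cases hf : xs.reverse.find? (fun x => x != 0) with
    | some y => simp
    | none =>
      by_cases hx : x = 0
      · simp [hx]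
      · simp [hx]

-- ===== VERDICT (by name: the statement is the Claim_ definition above) =====
theorem nueva_lista_spec : Claim_equal_nueva_lista := by
  intro lista _
  unfold Spec_nueva_lista nueva_lista nueva_lista_alt
  have h := pv_fold_char lista lista [] [] 0 rfl
  simp only [List.length_nil, Int.natCast_zero] at h
  rw [h]
  simp only [List.getLast?_nil, List.nil_append]
  rw [pv_lastnz_find, pv_preds_none]
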